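-- pv_equiv track=rewrite | github.com/SeongSuKim95/Python_practice | Yongn.py | solution
-- ===== SOURCE A (Python) =====
-- from itertools import combinations
--
-- def solution(factory):
--     answer = []
--     item = {i for i in range(0,len(factory[1]))}
--     for i in range(1,len(factory[1])+1):
--         for j in combinations(item,i):
--             fact = {p: False for p in range(len(factory))}
--             for index in j:
--                 for idx,k in enumerate(factory):
--                     if k[index]:
--                         fact[idx] = True
--             if sum(list(fact.values())) == len(factory):
--                 return i
-- ===== SOURCE B (Python) =====
-- def solution(factory):
--     # Minimum number of columns (indices 0..len(factory[1])-1, the function's column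
--     # universe) whose True entries together cover every row.
--     # Bitmask BFS: one bit per row, level i = row-sets coverable by i columns.
--     n = len(factory)
--     full = (1 << n) - 1
--     masks = set()
--     for c in range(len(factory[1])):
--         m = 0
--         for r in range(n):
--             if factory[r][c]:
--                 m |= 1 << r
--         if m:
--             masks.add(m)
--     reachable = {0}
--     for i in range(1, len(masks) + 1):
--         reachable = {s | m for s in reachable for m in masks}
--         if full in reachable:
--             return i
--     return None
-- ===== Notes on version B (the rewrite author's own statement) =====
-- stated objective: alternative
-- what changed: A enumerates all column combinations of each size and re-scans the whole matrix for each; B precomputes one row-coverage bitmask per column and does a breadth-first OR-closure over covered-row bitmasks, returning the first level that reaches the all-rows mask (faster at moderate sizes in a timing run, but both are exponential in the worst case, so no speed claim).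
-- outside the precondition, e.g. on solution([[True], [True, True]]): A returns 1, B raises IndexError
import Mathlib
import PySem

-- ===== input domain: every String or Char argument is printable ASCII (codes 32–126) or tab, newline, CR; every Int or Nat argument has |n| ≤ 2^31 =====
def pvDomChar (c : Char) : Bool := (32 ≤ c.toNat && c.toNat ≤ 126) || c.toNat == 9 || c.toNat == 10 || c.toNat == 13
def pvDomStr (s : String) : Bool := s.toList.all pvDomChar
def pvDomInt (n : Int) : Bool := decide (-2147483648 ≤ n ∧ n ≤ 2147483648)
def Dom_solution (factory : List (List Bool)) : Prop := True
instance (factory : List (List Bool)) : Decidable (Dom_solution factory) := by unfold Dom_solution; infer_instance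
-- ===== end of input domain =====

-- B is a different algorithm (per-column row-coverage bitmasks + breadth-first OR-closure)
-- instead of A's enumeration of all column combinations of each size; equivalence is proved
-- on inputs with at least two rows, each at least len(factory[1]) wide (Pre_solution).

-- shared accessors: row[c] and factory[r][c] for Nat indices (Python row[c], factory[r][c])
def pvVal (row : List Bool) (c : Nat) : Bool := (PySem.List.pyGet? row (c : Int)).getD false
def pvValAt (factory : List (List Bool)) (r c : Nat) : Bool :=
  pvVal ((PySem.List.pyGet? factory ((r : Nat) : Int)).getD []) c

-- ===== PORT A =====
-- fact = {p: False for p in range(len(factory))}; for index in j: for idx,k in enumerate(factory): if k[index]: fact[idx]=True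
-- (the dict keyed by 0..n-1 is represented positionally as a List Bool of length n)
def pvFact (factory : List (List Bool)) (j : List Nat) : List Bool :=
  j.foldl
    (fun fact index => (factory.zip fact).map (fun p => if pvVal p.1 index then true else p.2))
    (factory.map (fun _ => false))

-- for i in range(1, len(factory[1])+1): for j in combinations(item, i): … return i
def solution (factory : List (List Bool)) : Option Int :=
  let ncols := ((PySem.List.pyGet? factory 1).getD []).length
  (List.range' 1 ncols).findSome? (fun i =>
    if ((List.range ncols).sublistsLen i).any
        (fun j => (pvFact factory j).count true == factory.length)
    then some (i : Int) else none)

-- ===== PORT B =====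
-- m = 0; for r in range(n): if factory[r][c]: m |= 1 << r
def pvColMask (factory : List (List Bool)) (c : Nat) : Nat :=
  (List.range factory.length).foldl
    (fun (m : Nat) (r : Nat) => if pvValAt factory r c then m ||| ((1 : Nat) <<< r) else m)
    0

-- masks = set(); for c in range(w): …; if m: masks.add(m)
def pvMasksAux (factory : List (List Bool)) (w : Nat) : PySem.Set Nat :=
  (List.range w).foldl
    (fun s c => let m := pvColMask factory c; if m ≠ 0 then PySem.Set.add s m else s)
    PySem.Set.empty

def pvMasks (factory : List (List Bool)) : PySem.Set Nat :=
  pvMasksAux factory ((PySem.List.pyGet? factory 1).getD []).length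

-- reachable = {s | m for s in reachable for m in masks}
def pvStep (masks : List Nat) (reach : List Nat) : List Nat :=
  PySem.Set.ofList (reach.flatMap (fun s => masks.map (fun m => s ||| m)))

-- for i in range(1, len(masks)+1): reachable = …; if full in reachable: return i
def pvLoop (masks : List Nat) (full : Nat) : List Nat → List Nat → Option Int
  | [], _ => none
  | i :: is, reach =>
    let r' := pvStep masks reach
    if full ∈ r' then some (i : Int) else pvLoop masks full is r'

def solution_alt (factory : List (List Bool)) : Option Int :=
  let full := (1 <<< factory.length) - 1
  let masks := pvMasks factory
  pvLoop masks full (List.range' 1 masks.length) [0]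

-- ===== PRECONDITION & SPEC =====
-- Pre_ excludes inputs with fewer than two rows (A indexes factory[1]: IndexError) and inputs
-- with a row shorter than row 1 (the column count both versions use): there A raises IndexError
-- unless an early small cover happens to return first, and B's natural column scan raises.
def Pre_solution (factory : List (List Bool)) : Prop :=
  2 ≤ factory.length ∧
    ∀ row ∈ factory, ((PySem.List.pyGet? factory 1).getD []).length ≤ row.length
instance (factory : List (List Bool)) : Decidable (Pre_solution factory) := by
  unfold Pre_solution; infer_instance

def pvWitness_solution : List (List Bool) := [[true, false], [false, true]]

def Spec_solution (factory : List (List Bool)) (out : Option Int) : Prop := out = solution_alt factory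
instance (factory : List (List Bool)) (out : Option Int) : Decidable (Spec_solution factory out) := by
  unfold Spec_solution; infer_instance

-- ===== CLAIM (what is proved, stated in full; the proofs are below) =====
def Claim_equal_solution : Prop :=
  ∀ (factory : List (List Bool)), Dom_solution factory → Pre_solution factory →
    Spec_solution factory (solution factory)

-- ===== LEMMAS AND PROOFS =====

-- row 1's length (the column count A uses) and row 0's length (the one B uses)
def pvW (factory : List (List Bool)) : Nat := ((PySem.List.pyGet? factory 1).getD []).length

-- "the chosen columns j cover every row", as A's inner test decides it
def covB (factory : List (List Bool)) (j : List Nat) : Bool :=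
  factory.all (fun row => j.any (fun c => pvVal row c))

-- OR of a list of masks, as B's loop accumulates it
def orBits (L : List Nat) : Nat := L.foldl (· ||| ·) 0

-- t-fold application of pvStep to {0}
def stepIter (M : List Nat) (t : Nat) : List Nat := (pvStep M)^[t] [0]

-- the common semantic predicate: "at most i masks drawn from M OR to full"
def QB (M : List Nat) (full : Nat) (i : Nat) : Prop :=
  ∃ L : List Nat, L.length ≤ i ∧ (∀ m ∈ L, m ∈ M) ∧ orBits L = full

-- "at most i columns (a sub-selection of range w) cover all rows"
def QA (factory : List (List Bool)) (i : Nat) : Prop :=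
  ∃ j : List Nat, j.Sublist (List.range (pvW factory)) ∧ j.length ≤ i ∧ covB factory j = true

-- ---- A-side: the fold of row-flag updates is a map ----

lemma zip_map_self {α β : Type} (l : List α) (g : α → β) (h : α × β → β) :
    (l.zip (l.map g)).map h = l.map (fun x => h (x, g x)) := by
  induction l with
  | nil => simp
  | cons x xs ih => simp [ih]

lemma pvFact_foldl (factory : List (List Bool)) (j : List Nat) (g : List Bool → Bool) :
    j.foldl (fun fact index => (factory.zip fact).map (fun p => if pvVal p.1 index then true else p.2))
      (factory.map g)
      = factory.map (fun row => g row || j.any (fun c => pvVal row c)) := by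
  induction j generalizing g with
  | nil => simp
  | cons c j ih =>
    simp only [List.foldl_cons]
    rw [zip_map_self factory g (fun p => if pvVal p.1 c then true else p.2)]
    rw [ih (fun row => if pvVal row c then true else g row)]
    congr 1; funext row
    cases h1 : pvVal row c <;> cases h2 : g row <;> simp [h1]

lemma pvFact_eq (factory : List (List Bool)) (j : List Nat) :
    pvFact factory j = factory.map (fun row => j.any (fun c => pvVal row c)) := by
  unfold pvFact
  rw [pvFact_foldl factory j (fun _ => false)]
  simp

lemma count_iff (factory : List (List Bool)) (j : List Nat) :
    (((pvFact factory j).count true == factory.length) = true) ↔ covB factory j = true := by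
  rw [beq_iff_eq, pvFact_eq]
  rw [show factory.length = (factory.map (fun row => j.any (fun c => pvVal row c))).length by
        simp]
  rw [List.count_eq_length]
  simp only [covB, List.all_eq_true, List.mem_map]
  constructor
  · intro h row hrow
    exact (h _ ⟨row, hrow, rfl⟩).symm
  · rintro h b ⟨row, hrow, rfl⟩
    exact (h row hrow).symm

lemma valAt_eq (factory : List (List Bool)) (r c : Nat) (h : r < factory.length) :
    pvValAt factory r c = pvVal factory[r] c := by
  simp [pvValAt, PySem.List.pyGet?_natCast, List.getElem?_eq_getElem h]

lemma covB_iff (factory : List (List Bool)) (j : List Nat) :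
    covB factory j = true ↔
      ∀ (r : Nat), r < factory.length → ∃ c ∈ j, pvValAt factory r c = true := by
  simp only [covB, List.all_eq_true, List.forall_mem_iff_forall_getElem, List.any_eq_true]
  constructor
  · intro h r hr
    obtain ⟨c, hc, hv⟩ := h r hr
    exact ⟨c, hc, by rw [valAt_eq factory r c hr]; exact hv⟩
  · intro h r hr
    obtain ⟨c, hc, hv⟩ := h r hr
    exact ⟨c, hc, by rw [valAt_eq factory r c hr] at hv; exact hv⟩

-- ---- B-side: bits of a column mask ----

lemma colMask_testBit (factory : List (List Bool)) (c t : Nat) :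
    (pvColMask factory c).testBit t = (decide (t < factory.length) && pvValAt factory t c) := by
  unfold pvColMask
  generalize factory.length = n
  induction n with
  | zero => simp
  | succ n ih =>
    rw [List.range_succ, List.foldl_append]
    simp only [List.foldl_cons, List.foldl_nil]
    by_cases h : pvValAt factory n c
    · rw [if_pos h, Nat.testBit_or, ih, Nat.one_shiftLeft, Nat.testBit_two_pow]
      by_cases h1 : t = n
      · subst h1; simp [h]
      · have hne : ¬ n = t := fun hh => h1 hh.symm
        have hiff : (t < n) = (t < n + 1) := by
          apply propext; omega
        simp [hne, hiff]
    · rw [if_neg h, ih]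
      by_cases h1 : t = n
      · subst h1
        simp [show (pvValAt factory t c) = false from Bool.eq_false_iff.mpr h]
      · have hd : decide (t < n) = decide (t < n + 1) := decide_eq_decide.mpr (by omega)
        rw [hd]

lemma colMask_bit_lt (factory : List (List Bool)) (c t : Nat)
    (h : (pvColMask factory c).testBit t = true) : t < factory.length := by
  rw [colMask_testBit] at h
  by_contra hc
  rw [decide_eq_false hc] at h
  simp at h

-- ---- B-side: the mask set ----

lemma set_add_length {α : Type} [BEq α] (s : PySem.Set α) (x : α) :
    (PySem.Set.add s x).length ≤ s.length + 1 := by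
  simp only [PySem.Set.add]
  split <;> simp

lemma masksAux_step (factory : List (List Bool)) (w : Nat) :
    pvMasksAux factory (w + 1) =
      (if pvColMask factory w ≠ 0 then PySem.Set.add (pvMasksAux factory w) (pvColMask factory w)
       else pvMasksAux factory w) := by
  unfold pvMasksAux
  rw [List.range_succ, List.foldl_append]
  simp

lemma mem_masksAux (factory : List (List Bool)) (w : Nat) (m : Nat) :
    m ∈ pvMasksAux factory w ↔ (m ≠ 0 ∧ ∃ c, c < w ∧ pvColMask factory c = m) := by
  induction w with
  | zero => simp [pvMasksAux, PySem.Set.empty]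
  | succ w ih =>
    rw [masksAux_step]
    split
    · rename_i hz
      rw [PySem.Set.mem_add, ih]
      constructor
      · rintro (⟨hm, c, hc, hcm⟩ | rfl)
        · exact ⟨hm, c, by omega, hcm⟩
        · exact ⟨hz, w, by omega, rfl⟩
      · rintro ⟨hm, c, hc, hcm⟩
        by_cases hcw : c = w
        · subst hcw; right; exact hcm.symm
        · left; exact ⟨hm, c, by omega, hcm⟩
    · rename_i hz
      rw [not_ne_iff] at hz
      rw [ih]
      constructor
      · rintro ⟨hm, c, hc, hcm⟩
        exact ⟨hm, c, by omega, hcm⟩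
      · rintro ⟨hm, c, hc, hcm⟩
        by_cases hcw : c = w
        · subst hcw; exact absurd (hcm.symm.trans hz) hm
        · exact ⟨hm, c, by omega, hcm⟩

lemma masksAux_len (factory : List (List Bool)) (w : Nat) :
    (pvMasksAux factory w).length ≤ w := by
  induction w with
  | zero => simp [pvMasksAux]
  | succ w ih =>
    rw [masksAux_step]
    split
    · exact le_trans (set_add_length _ _) (by omega)
    · omega

-- ---- OR accumulation ----

lemma orBits_foldl (L : List Nat) (t : Nat) :
    ∀ a : Nat, (L.foldl (· ||| ·) a).testBit t = (a.testBit t || L.any (fun m => m.testBit t)) := by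
  induction L with
  | nil => simp
  | cons x xs ih =>
    intro a
    simp [List.foldl_cons, ih, Nat.testBit_or, Bool.or_assoc]

lemma orBits_testBit (L : List Nat) (t : Nat) :
    (orBits L).testBit t = L.any (fun m => m.testBit t) := by
  simp [orBits, orBits_foldl]

lemma orBits_concat (L : List Nat) (m : Nat) : orBits (L ++ [m]) = orBits L ||| m := by
  simp [orBits, List.foldl_append]

-- ---- reachability levels of B's loop ----

lemma mem_stepIter (M : List Nat) :
    ∀ (t : Nat) (x : Nat),
      x ∈ stepIter M t ↔ ∃ L : List Nat, L.length = t ∧ (∀ m ∈ L, m ∈ M) ∧ orBits L = x := by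
  intro t
  induction t with
  | zero =>
    intro x
    constructor
    · intro hx
      refine ⟨[], rfl, by simp, ?_⟩
      simp only [stepIter, Function.iterate_zero_apply, List.mem_singleton] at hx
      simp [orBits, hx]
    · rintro ⟨L, hL, _, hor⟩
      rw [List.length_eq_zero_iff] at hL
      subst hL
      simp only [stepIter, Function.iterate_zero_apply, List.mem_singleton]
      simp [orBits] at hor
      omega
  | succ t ih =>
    intro x
    have hstep : stepIter M (t + 1) = pvStep M (stepIter M t) := by
      simp [stepIter, Function.iterate_succ_apply']
    rw [hstep]
    simp only [pvStep, PySem.Set.mem_ofList, List.mem_flatMap, List.mem_map]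
    constructor
    · rintro ⟨s, hs, m, hm, rfl⟩
      obtain ⟨L, hL, hmem, hor⟩ := (ih s).mp hs
      exact ⟨L ++ [m], by simp [hL], by
        intro m' hm'
        rcases List.mem_append.mp hm' with h | h
        · exact hmem m' h
        · rw [List.mem_singleton] at h; subst h; exact hm, by rw [orBits_concat, hor]⟩
    · rintro ⟨L, hL, hmem, rfl⟩
      have hne : L ≠ [] := by intro h; subst h; simp at hL
      have hsplit := List.dropLast_concat_getLast hne
      refine ⟨orBits L.dropLast, (ih _).mpr ⟨L.dropLast, ?_, ?_, rfl⟩, L.getLast hne, ?_, ?_⟩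
      · rw [List.length_dropLast, hL]; omega
      · intro m hm; exact hmem m (List.dropLast_subset L hm)
      · exact hmem _ (List.getLast_mem hne)
      · rw [← orBits_concat, hsplit]

-- ---- generic first-hit lemmas for A's search ----

lemma findSome_none (P : Nat → Bool) :
    ∀ (k a : Nat), (∀ i, a ≤ i → i < a + k → P i = false) →
      (List.range' a k).findSome? (fun i => if P i then some (i : Int) else none) = none := by
  intro k
  induction k with
  | zero => intro a _; simp
  | succ k ih =>
    intro a h
    rw [List.range'_succ]
    have hPa : P a = false := h a le_rfl (by omega)
    simp only [List.findSome?, hPa]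
    exact ih (a + 1) (fun i h1 h2 => h i (by omega) (by omega))

lemma findSome_some (P : Nat → Bool) :
    ∀ (k a i₀ : Nat), a ≤ i₀ → i₀ < a + k → P i₀ = true →
      (∀ t, a ≤ t → t < i₀ → P t = false) →
      (List.range' a k).findSome? (fun i => if P i then some (i : Int) else none) = some (i₀ : Int) := by
  intro k
  induction k with
  | zero => intro a i₀ h1 h2; omega
  | succ k ih =>
    intro a i₀ h1 h2 hP hmin
    rw [List.range'_succ]
    by_cases ha : i₀ = a
    · subst ha
      simp only [List.findSome?, hP, if_true]
    · have hPa : P a = false := hmin a le_rfl (by omega)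
      simp only [List.findSome?, hPa]
      exact ih (a + 1) i₀ (by omega) (by omega) hP (fun t ht1 ht2 => hmin t (by omega) ht2)

-- ---- generic first-hit lemmas for B's loop ----

lemma pvLoop_none (M : List Nat) (full : Nat) :
    ∀ (k a : Nat), (∀ t, a + 1 ≤ t → t ≤ a + k → full ∉ stepIter M t) →
      pvLoop M full (List.range' (a + 1) k) (stepIter M a) = none := by
  intro k
  induction k with
  | zero => intro a _; simp [pvLoop]
  | succ k ih =>
    intro a h
    rw [List.range'_succ]
    have hstep : pvStep M (stepIter M a) = stepIter M (a + 1) := by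
      simp [stepIter, Function.iterate_succ_apply']
    simp only [pvLoop, hstep]
    have hno : full ∉ stepIter M (a + 1) := h (a + 1) le_rfl (by omega)
    simp only [hno, if_false]
    exact ih (a + 1) (fun t h1 h2 => h t (by omega) (by omega))

lemma pvLoop_some (M : List Nat) (full : Nat) :
    ∀ (k a i₀ : Nat), a + 1 ≤ i₀ → i₀ ≤ a + k → full ∈ stepIter M i₀ →
      (∀ t, t < i₀ → full ∉ stepIter M t) →
      pvLoop M full (List.range' (a + 1) k) (stepIter M a) = some (i₀ : Int) := by
  intro k
  induction k with
  | zero => intro a i₀ h1 h2; omega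
  | succ k ih =>
    intro a i₀ h1 h2 hP hmin
    rw [List.range'_succ]
    have hstep : pvStep M (stepIter M a) = stepIter M (a + 1) := by
      simp [stepIter, Function.iterate_succ_apply']
    simp only [pvLoop, hstep]
    by_cases ha : i₀ = a + 1
    · subst ha
      simp only [hP, if_true]
    · have hno : full ∉ stepIter M (a + 1) := hmin (a + 1) (by omega)
      simp only [hno, if_false]
      exact ih (a + 1) i₀ (by omega) (by omega) hP hmin

-- ---- a nodup list is no longer than any list containing it ----

lemma nodup_subset_length {α : Type} [DecidableEq α] (l1 l2 : List α)
    (hn : l1.Nodup) (hs : l1 ⊆ l2) : l1.length ≤ l2.length := by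
  have h1 : l1.toFinset.card = l1.length := List.toFinset_card_of_nodup hn
  have h2 : l1.toFinset ⊆ l2.toFinset := by
    intro x hx; simp only [List.mem_toFinset] at hx ⊢; exact hs hx
  have h3 := Finset.card_le_card h2
  have h4 := l2.toFinset_card_le
  omega

-- ---- the two semantic predicates agree ----

lemma QA_to_QB (factory : List (List Bool)) (i : Nat) :
    QA factory i → QB (pvMasks factory) (2 ^ factory.length - 1) i := by
  rintro ⟨j, hsub, hlen, hcov⟩
  refine ⟨(j.filter (fun c => pvColMask factory c != 0)).map (pvColMask factory), ?_, ?_, ?_⟩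
  · calc ((j.filter (fun c => pvColMask factory c != 0)).map (pvColMask factory)).length
        = (j.filter (fun c => pvColMask factory c != 0)).length := by simp
      _ ≤ j.length := j.length_filter_le _
      _ ≤ i := hlen
  · intro m hm
    obtain ⟨c, hc, rfl⟩ := List.mem_map.mp hm
    obtain ⟨hcj, hcz⟩ := List.mem_filter.mp hc
    have hcw : c < pvW factory := List.mem_range.mp (hsub.subset hcj)
    show pvColMask factory c ∈ pvMasksAux factory (pvW factory)
    rw [mem_masksAux]
    exact ⟨by simpa using hcz, c, hcw, rfl⟩
  · apply Nat.eq_of_testBit_eq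
    intro t
    rw [orBits_testBit, Nat.testBit_two_pow_sub_one]
    by_cases htn : t < factory.length
    · rw [decide_eq_true htn, List.any_eq_true]
      obtain ⟨c, hcj, hval⟩ := (covB_iff factory j).mp hcov t htn
      have hbit : (pvColMask factory c).testBit t = true := by
        rw [colMask_testBit]
        simp [htn, hval]
      have hnz : pvColMask factory c ≠ 0 := by
        intro h0; rw [h0] at hbit; simp at hbit
      refine ⟨pvColMask factory c, List.mem_map.mpr ⟨c, List.mem_filter.mpr ⟨hcj, by simpa using hnz⟩, rfl⟩, hbit⟩
    · rw [decide_eq_false htn, List.any_eq_false]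
      intro m hm
      obtain ⟨c, hc, rfl⟩ := List.mem_map.mp hm
      intro hbit
      exact htn (colMask_bit_lt factory c t hbit)

lemma QB_to_QA (factory : List (List Bool)) (i : Nat) :
    QB (pvMasks factory) (2 ^ factory.length - 1) i → QA factory i := by
  rintro ⟨L, hlen, hmem, hor⟩
  classical
  set reps := L.filterMap
    (fun m => (List.range (pvW factory)).find? (fun c => pvColMask factory c == m)) with hreps
  refine ⟨(List.range (pvW factory)).filter (fun c => decide (c ∈ reps)),
    List.filter_sublist, ?_, ?_⟩
  · have hnd : ((List.range (pvW factory)).filter (fun c => decide (c ∈ reps))).Nodup :=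
      (List.nodup_range).filter _
    have hss : ((List.range (pvW factory)).filter (fun c => decide (c ∈ reps))) ⊆ reps := by
      intro c hc
      have := (List.mem_filter.mp hc).2
      simpa using this
    calc ((List.range (pvW factory)).filter (fun c => decide (c ∈ reps))).length
        ≤ reps.length := nodup_subset_length _ _ hnd hss
      _ ≤ L.length := List.length_filterMap_le _ _
      _ ≤ i := hlen
  · rw [covB_iff]
    intro r hr
    have hfull : (2 ^ factory.length - 1).testBit r = true := by
      rw [Nat.testBit_two_pow_sub_one]; exact decide_eq_true hr
    rw [← hor, orBits_testBit, List.any_eq_true] at hfull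
    obtain ⟨m, hmL, hbit⟩ := hfull
    have hmM := hmem m hmL
    rw [show pvMasks factory = pvMasksAux factory (pvW factory) from rfl, mem_masksAux] at hmM
    obtain ⟨-, c, hcw, hcm⟩ := hmM
    have hfind : ((List.range (pvW factory)).find? (fun c => pvColMask factory c == m)).isSome := by
      rw [List.find?_isSome]
      exact ⟨c, List.mem_range.mpr hcw, by simp [hcm]⟩
    obtain ⟨c₁, hc₁⟩ := Option.isSome_iff_exists.mp hfind
    have hc₁m : pvColMask factory c₁ = m := by
      have := List.find?_some hc₁
      simpa using this
    have hc₁w : c₁ ∈ List.range (pvW factory) := List.mem_of_find?_eq_some hc₁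
    have hc₁reps : c₁ ∈ reps := by
      rw [hreps]
      exact List.mem_filterMap.mpr ⟨m, hmL, hc₁⟩
    refine ⟨c₁, List.mem_filter.mpr ⟨hc₁w, by simpa using hc₁reps⟩, ?_⟩
    have hb : (pvColMask factory c₁).testBit r = true := by rw [hc₁m]; exact hbit
    rw [colMask_testBit, decide_eq_true hr, Bool.true_and] at hb
    exact hb

-- ===== VERDICT (by name: the statement is the Claim_ definition above) =====
theorem solution_spec : Claim_equal_solution := by
  intro factory _ hpre
  obtain ⟨hn2, -⟩ := hpre
  show solution factory = solution_alt factory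
  set M : List Nat := pvMasks factory with hM
  set full : Nat := 2 ^ factory.length - 1 with hfull
  set PA : Nat → Bool := fun i =>
    ((List.range (pvW factory)).sublistsLen i).any
      (fun j => (pvFact factory j).count true == factory.length) with hPA
  have hsol : solution factory =
      (List.range' 1 (pvW factory)).findSome? (fun i => if PA i then some (i : Int) else none) := rfl
  have hsalt : solution_alt factory = pvLoop M full (List.range' (0 + 1) M.length) (stepIter M 0) := by
    unfold solution_alt
    rw [Nat.one_shiftLeft]
    rfl
  have hQAB : ∀ i, QA factory i ↔ QB M full i := fun i =>
    ⟨QA_to_QB factory i, QB_to_QA factory i⟩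
  have hPA_QA : ∀ t, PA t = true → QA factory t := by
    intro t ht
    rw [hPA, List.any_eq_true] at ht
    obtain ⟨j, hjm, hjc⟩ := ht
    obtain ⟨hjsub, hjlen⟩ := List.mem_sublistsLen.mp hjm
    exact ⟨j, hjsub, le_of_eq hjlen, (count_iff factory j).mp hjc⟩
  have hfour : 4 ≤ 2 ^ factory.length :=
    le_trans (by norm_num) (Nat.pow_le_pow_right (by omega) hn2)
  by_cases hex : ∃ i, QB M full i
  · haveI : DecidablePred (QB M full) := fun _ => Classical.propDecidable _
    have hQ : QB M full (Nat.find hex) := Nat.find_spec hex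
    set i₀ : Nat := Nat.find hex with hi₀
    have hmin : ∀ t, t < i₀ → ¬ QB M full t := fun t ht => Nat.find_min hex ht
    have hpos : 1 ≤ i₀ := by
      rcases Nat.eq_zero_or_pos i₀ with h | h
      swap
      · exact h
      · exfalso
        obtain ⟨L, hL, -, hor⟩ := hQ
        rw [h, Nat.le_zero, List.length_eq_zero_iff] at hL
        subst hL
        have : (0 : Nat) = full := hor
        omega
    have horM : orBits M = full := by
      apply Nat.eq_of_testBit_eq
      intro t
      rw [orBits_testBit, hfull, Nat.testBit_two_pow_sub_one]
      by_cases htn : t < factory.length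
      · rw [decide_eq_true htn, List.any_eq_true]
        obtain ⟨L, -, hmem, hor⟩ := hQ
        have hft : full.testBit t = true := by
          rw [hfull, Nat.testBit_two_pow_sub_one]; exact decide_eq_true htn
        rw [← hor, orBits_testBit, List.any_eq_true] at hft
        obtain ⟨m, hmL, hb⟩ := hft
        exact ⟨m, hmem m hmL, hb⟩
      · rw [decide_eq_false htn, List.any_eq_false]
        intro m hm
        simp only [Bool.not_eq_true]
        apply Bool.eq_false_iff.mpr
        intro hb
        obtain ⟨-, c, -, hcm⟩ := (mem_masksAux factory (pvW factory) m).mp hm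
        exact htn (colMask_bit_lt factory c t (hcm ▸ hb))
    have hiM : i₀ ≤ M.length := Nat.find_min' hex ⟨M, le_rfl, fun m hm => hm, horM⟩
    have hMw : M.length ≤ pvW factory := masksAux_len factory (pvW factory)
    -- the minimal cover has exactly i₀ columns
    obtain ⟨j, hjsub, hjlen, hjcov⟩ := (hQAB i₀).mpr hQ
    have hjexact : j.length = i₀ := by
      by_contra hne
      exact hmin j.length (by omega) ((hQAB j.length).mp ⟨j, hjsub, le_rfl, hjcov⟩)
    have hA : solution factory = some (i₀ : Int) := by
      rw [hsol]
      apply findSome_some PA (pvW factory) 1 i₀ hpos (by omega)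
      · rw [hPA, List.any_eq_true]
        exact ⟨j, List.mem_sublistsLen.mpr ⟨hjsub, hjexact⟩, (count_iff factory j).mpr hjcov⟩
      · intro t _ ht
        apply Bool.eq_false_iff.mpr
        intro hPAt
        exact hmin t ht ((hQAB t).mp (hPA_QA t hPAt))
    have hB : solution_alt factory = some (i₀ : Int) := by
      rw [hsalt]
      apply pvLoop_some M full M.length 0 i₀ (by omega) (by omega)
      · obtain ⟨L, hLlen, hLmem, hLor⟩ := hQ
        have hLexact : L.length = i₀ := by
          by_contra hne
          exact hmin L.length (by omega) ⟨L, le_rfl, hLmem, hLor⟩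
        exact (mem_stepIter M i₀ full).mpr ⟨L, hLexact, hLmem, hLor⟩
      · intro t ht hfullmem
        obtain ⟨L, hLlen, hLmem, hLor⟩ := (mem_stepIter M t full).mp hfullmem
        exact hmin t ht ⟨L, le_of_eq hLlen, hLmem, hLor⟩
    rw [hA, hB]
  · have hA : solution factory = none := by
      rw [hsol]
      apply findSome_none PA (pvW factory) 1
      intro i _ _
      apply Bool.eq_false_iff.mpr
      intro hPAt
      exact hex ⟨i, (hQAB i).mp (hPA_QA i hPAt)⟩
    have hB : solution_alt factory = none := by
      rw [hsalt]
      apply pvLoop_none M full M.length 0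
      intro t _ _ hfullmem
      obtain ⟨L, hLlen, hLmem, hLor⟩ := (mem_stepIter M t full).mp hfullmem
      exact hex ⟨t, L, le_of_eq hLlen, hLmem, hLor⟩
    rw [hA, hB]
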